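-- pv_equiv track=rewrite | github.com/ahujaradhika/elmo | Buzzfeed2.py | people_says
-- ===== SOURCE A (Python) =====
-- def people_says (textlist,character):
--     sublist = []
--     words_list = []
--     for i in range(len(textlist)):
--         if (textlist[i].strip() == character):
--             j = i + 1
--             while (textlist[j]!= ''):
--                 j += 1
--             sublist.append(textlist[i+1:j])
--     words_list.append(sublist)
-- #     for character in dictionary_names.values():
-- #         if character != '':
-- #             for i in range(len(textlist)):
-- #                 if (textlist[i].strip() == character):
-- #                     j = i + 1
-- #                     while (textlist[j]!= ''):
-- #                         j += 1
-- #                     sublist.append(textlist[i:j])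
-- #         words_list.append(sublist)
--     return words_list
-- ===== SOURCE B (Python) =====
-- def people_says(textlist, character):
--     # one backward pass: next_empty[i] = index of first '' at position >= i (n if none)
--     n = len(textlist)
--     next_empty = [n] * (n + 1)
--     for i in range(n - 1, -1, -1):
--         next_empty[i] = i if textlist[i] == '' else next_empty[i + 1]
--     sublist = [textlist[i + 1:next_empty[i + 1]]
--                for i, line in enumerate(textlist) if line.strip() == character]
--     return [sublist]
-- ===== Notes on version B (the rewrite author's own statement) =====
-- stated objective: alternative
-- what changed: Replaced A's per-match forward while-loop rescan to the next empty line by a single backward pass precomputing a next-empty-line index table, so each block end is a table lookup; it removes the repeated rescans but was not measurably faster on the generated inputs.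
import Mathlib
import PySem

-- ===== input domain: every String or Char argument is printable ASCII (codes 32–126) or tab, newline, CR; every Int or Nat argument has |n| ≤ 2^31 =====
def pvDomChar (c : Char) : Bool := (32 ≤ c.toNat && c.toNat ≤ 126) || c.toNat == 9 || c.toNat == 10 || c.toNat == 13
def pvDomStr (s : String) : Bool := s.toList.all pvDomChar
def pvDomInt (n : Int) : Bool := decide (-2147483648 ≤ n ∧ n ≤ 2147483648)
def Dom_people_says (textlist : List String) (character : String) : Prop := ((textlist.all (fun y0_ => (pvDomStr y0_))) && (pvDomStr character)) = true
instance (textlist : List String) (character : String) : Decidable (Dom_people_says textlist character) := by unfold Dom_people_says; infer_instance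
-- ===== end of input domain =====

-- B replaces A's per-match forward while-loop rescan by one backward pass that precomputes the
-- next-empty-line index for every position, so each block end is a table lookup (objective: alternative).

-- ===== PORT A =====
-- the inner `while textlist[j] != '': j += 1`; when j runs past the end Python raises
-- IndexError (excluded by Pre_), here it stops at textlist.length
def psWhile (textlist : List String) (j : Nat) : Nat :=
  if h : j < textlist.length then
    if textlist[j] ≠ "" then psWhile textlist (j + 1) else j
  else j
termination_by textlist.length - j

def people_says (textlist : List String) (character : String) : List (List (List String)) :=
  let sublist := (List.range textlist.length).foldl
    (fun acc i =>
      if PySem.Str.strip (textlist.getD i "") == character then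
        acc ++ [PySem.List.slice textlist (some ((i : Int) + 1))
                  (some ((psWhile textlist (i + 1) : Nat) : Int))]
      else acc) []
  let words_list := ([] : List (List (List String))) ++ [sublist]
  words_list

-- ===== PORT B =====
-- next_empty computed right-to-left: neFrom i xs = [next_empty[i], …, next_empty[i+len xs]]
def neFrom (i : Nat) : List String → List Nat
  | [] => [i]
  | x :: rest =>
      let t := neFrom (i + 1) rest
      (if x == "" then i else t.headD (i + 1)) :: t

def people_says_alt (textlist : List String) (character : String) : List (List (List String)) :=
  let ne := neFrom 0 textlist
  let sublist := (PySem.List.enumerate textlist).filterMap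
    (fun p =>
      if PySem.Str.strip p.2 == character then
        some (PySem.List.slice textlist (some (p.1 + 1))
                (some ((ne.getD (p.1 + 1).toNat 0 : Nat) : Int)))
      else none)
  [sublist]

-- ===== PRECONDITION & SPEC =====
-- Pre_ excludes exactly the inputs on which Python A raises IndexError: a line that strips to
-- `character` with no empty line anywhere after it (the inner while runs off the list's end).
def Pre_people_says (textlist : List String) (character : String) : Prop :=
  ∀ i : Nat, i < textlist.length → PySem.Str.strip (textlist.getD i "") = character →
    ∃ j : Nat, j < textlist.length ∧ i < j ∧ textlist.getD j "x" = ""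
instance (textlist : List String) (character : String) : Decidable (Pre_people_says textlist character) := by unfold Pre_people_says; infer_instance

def pvWitness_people_says : List String × String := (["bob", "hi", "", "x"], "bob")

def Spec_people_says (textlist : List String) (character : String) (out : List (List (List String))) : Prop := out = people_says_alt textlist character
instance (textlist : List String) (character : String) (out : List (List (List String))) : Decidable (Spec_people_says textlist character out) := by unfold Spec_people_says; infer_instance

-- ===== CLAIM (what is proved, stated in full; the proofs are below) =====
def Claim_equal_people_says : Prop := ∀ (textlist : List String) (character : String), Dom_people_says textlist character → Pre_people_says textlist character → Spec_people_says textlist character (people_says textlist character)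

-- ===== LEMMAS AND PROOFS =====

-- number of leading non-empty lines: the common characterisation of A's while loop and B's table
def wlen : List String → Nat
  | [] => 0
  | x :: r => if x = "" then 0 else wlen r + 1

theorem psWhile_eq (textlist : List String) : ∀ k j, textlist.length - j = k → j ≤ textlist.length →
    psWhile textlist j = j + wlen (textlist.drop j) := by
  intro k
  induction k with
  | zero =>
      intro j hk hj
      have hj' : j = textlist.length := by omega
      subst hj'
      rw [psWhile]
      simp [wlen]
  | succ m ih =>
      intro j hk hj
      have hlt : j < textlist.length := by omega
      have hdrop : textlist.drop j = textlist[j] :: textlist.drop (j + 1) :=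
        List.drop_eq_getElem_cons hlt
      rw [psWhile, dif_pos hlt]
      by_cases he : textlist[j] = ""
      · simp [he, hdrop, wlen]
      · rw [if_pos he, ih (j + 1) (by omega) (by omega), hdrop]
        simp [wlen, he]; omega

theorem neFrom_headD (xs : List String) : ∀ i d, (neFrom i xs).headD d = i + wlen xs := by
  induction xs with
  | nil => intro i d; simp [neFrom, wlen]
  | cons x rest ih =>
      intro i d
      by_cases he : x = ""
      · simp [neFrom, he, wlen]
      · simp only [neFrom]
        simp only [List.headD_cons, wlen, beq_iff_eq, he, if_false]
        rw [ih (i + 1)]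
        omega

theorem neFrom_getD (xs : List String) : ∀ i j d, j ≤ xs.length →
    (neFrom i xs).getD j d = i + j + wlen (xs.drop j) := by
  induction xs with
  | nil =>
      intro i j d hj
      have : j = 0 := by simpa using hj
      subst this
      simp [neFrom, wlen]
  | cons x rest ih =>
      intro i j d hj
      cases j with
      | zero =>
          have h := neFrom_headD (x :: rest) i d
          simpa [List.getD] using h
      | succ j' =>
          have hj' : j' ≤ rest.length := by simpa using hj
          simp only [neFrom, List.getD_cons_succ, List.drop_succ_cons]
          rw [ih (i + 1) j' d hj']
          omega

theorem map_filter_eq_filterMap {α β : Type} (p : α → Bool) (f : α → β) (l : List α) :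
    List.map f (List.filter p l) = List.filterMap (fun x => if p x then some (f x) else none) l := by
  induction l with
  | nil => rfl
  | cons x xs ih => by_cases h : p x <;> simp [h, ih]

theorem sublists_eq (textlist : List String) (character : String) :
    people_says textlist character = people_says_alt textlist character := by
  unfold people_says people_says_alt
  rw [PySem.List.foldl_append_if
        (fun i => PySem.Str.strip (textlist.getD i "") == character)
        (fun i => PySem.List.slice textlist (some ((i : Int) + 1))
                    (some ((psWhile textlist (i + 1) : Nat) : Int)))]
  rw [PySem.List.enumerate_eq_map_pyRange textlist ""]
  simp only [PySem.List.len]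
  rw [PySem.List.pyRange_zero_natCast]
  rw [List.filterMap_map, List.filterMap_map]
  rw [map_filter_eq_filterMap]
  simp only [List.nil_append]
  refine congrArg (fun l => [l]) ?_
  refine List.filterMap_congr ?_
  intro i hi
  have hi' : i < textlist.length := List.mem_range.mp hi
  simp only [Function.comp, PySem.List.pyGetD_natCast]
  have hcast : ((i : Int) + 1).toNat = i + 1 := by omega
  have hend : psWhile textlist (i + 1) = (neFrom 0 textlist).getD (i + 1) 0 := by
    rw [psWhile_eq textlist (textlist.length - (i + 1)) (i + 1) rfl (by omega),
        neFrom_getD textlist 0 (i + 1) 0 (by omega)]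
    omega
  rw [hcast, ← hend]

-- ===== VERDICT (by name: the statement is the Claim_ definition above) =====
theorem people_says_spec : Claim_equal_people_says := by
  intro textlist character _ _
  unfold Spec_people_says
  exact sublists_eq textlist character
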